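-- pv_equiv track=rewrite | github.com/AnatoliiShara/leetcode_solved | check_if_every_row_column_contains_all_numbers.py | is_valid_matrix
-- ===== SOURCE A (Python) =====
-- def is_valid_matrix(matrix):
--     n = len(matrix)
--     # Check rows
--     for row in matrix:
--         if len(set(row)) != n or any(x not in row for x in range(1, n+1)):
--             return False
--     # Check columns
--     for j in range(n):
--         column = [matrix[i][j] for i in range(n)]
--         if len(set(column)) != n or any(x not in column for x in range(1, n+1)):
--             return False
--
--     return True
-- ===== SOURCE B (Python) =====
-- def is_valid_matrix(matrix):
--     n = len(matrix)
--     target = set(range(1, n + 1))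
--     cols = [set() for _ in range(n)]
--     rows_ok = True
--     for row in matrix:
--         if set(row) != target:
--             rows_ok = False
--         for c, v in zip(cols, row):
--             c.add(v)
--     return rows_ok and all(c == target for c in cols)
-- ===== Notes on version B (the rewrite author's own statement) =====
-- stated objective: alternative
-- what changed: A makes two separate scans (a row pass, then a column pass that materializes each column with an inner index loop) and re-scans range(1,n+1) for membership; B does one fused pass over the rows that tests each row's set against a precomputed target set and accumulates all n column sets via zip, then a single verification pass over the column sets.
import Mathlib
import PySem

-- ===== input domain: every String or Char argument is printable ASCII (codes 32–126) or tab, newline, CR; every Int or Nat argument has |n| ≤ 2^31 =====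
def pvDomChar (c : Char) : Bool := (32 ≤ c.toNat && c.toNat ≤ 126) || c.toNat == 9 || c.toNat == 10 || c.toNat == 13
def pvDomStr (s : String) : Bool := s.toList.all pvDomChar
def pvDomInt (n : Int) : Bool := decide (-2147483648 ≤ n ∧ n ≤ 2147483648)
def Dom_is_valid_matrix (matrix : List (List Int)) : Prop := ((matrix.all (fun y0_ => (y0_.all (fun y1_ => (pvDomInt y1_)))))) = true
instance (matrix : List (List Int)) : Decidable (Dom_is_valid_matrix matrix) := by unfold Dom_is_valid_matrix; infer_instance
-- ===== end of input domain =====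

-- B replaces A's two nested scans (rows, then per-index column materialization) with one fused
-- pass over the rows that checks each row's set and accumulates all column sets via zip,
-- followed by a single verification pass over the column sets (objective: alternative).

-- ===== PORT A =====
-- literal transliteration of A: two early-return loops; 'for … return False' is List.any,
-- matrix[i][j] is pyGetD/pyGetD (the default is never read: the column loop is only reached
-- when every row has n distinct elements, hence length ≥ n)
def is_valid_matrix (matrix : List (List Int)) : Bool :=
  let n : Int := matrix.length
  if matrix.any (fun row =>
      decide (((PySem.Set.ofList row).length : Int) ≠ n) ||
      (PySem.List.pyRange 1 (n + 1) 1).any (fun x => !(row.contains x)))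
  then false
  else if (PySem.List.pyRange 0 n 1).any (fun j =>
      let column := (PySem.List.pyRange 0 n 1).map (fun i =>
        PySem.List.pyGetD (PySem.List.pyGetD matrix i []) j 0)
      decide (((PySem.Set.ofList column).length : Int) ≠ n) ||
      (PySem.List.pyRange 1 (n + 1) 1).any (fun x => !(column.contains x)))
  then false
  else true

-- ===== PORT B =====
-- literal transliteration of Source B: one foldl over the rows carrying (rows_ok, cols);
-- 'for c, v in zip(cols, row): c.add(v)' becomes zipWith Set.add (untouched tail appended)
def is_valid_matrix_alt (matrix : List (List Int)) : Bool :=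
  let n := matrix.length
  let target : PySem.Set Int := PySem.Set.ofList (PySem.List.pyRange 1 ((n : Int) + 1) 1)
  let res := matrix.foldl
    (fun (acc : Bool × List (PySem.Set Int)) row =>
      ((acc.1 && PySem.Set.equal (PySem.Set.ofList row) target),
       (List.zipWith PySem.Set.add acc.2 row ++ acc.2.drop row.length)))
    (true, List.replicate n PySem.Set.empty)
  res.1 && res.2.all (fun c => PySem.Set.equal c target)

-- ===== PRECONDITION & SPEC =====
def Spec_is_valid_matrix (matrix : List (List Int)) (out : Bool) : Prop := out = is_valid_matrix_alt matrix
instance (matrix : List (List Int)) (out : Bool) : Decidable (Spec_is_valid_matrix matrix out) := by unfold Spec_is_valid_matrix; infer_instance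

-- ===== CLAIM (what is proved, stated in full; the proofs are below) =====
def Claim_equal_is_valid_matrix : Prop := ∀ (matrix : List (List Int)), Dom_is_valid_matrix matrix → Spec_is_valid_matrix matrix (is_valid_matrix matrix)

-- ===== LEMMAS AND PROOFS =====

-- the target range 1..n
theorem pv_len_range (n : Nat) : (PySem.List.pyRange 1 ((n : Int) + 1) 1).length = n := by
  simp [PySem.List.length_pyRange_one]

theorem pv_nodup_range (n : Nat) : (PySem.List.pyRange 1 ((n : Int) + 1) 1).Nodup := by
  simp [PySem.List.nodup_pyRange_one]

theorem pv_ofList_range (n : Nat) :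
    PySem.Set.ofList (PySem.List.pyRange 1 ((n : Int) + 1) 1) = PySem.List.pyRange 1 ((n : Int) + 1) 1 :=
  PySem.Set.ofList_eq_self_of_nodup _ (pv_nodup_range n)

-- set(xs) == set(range(1, n+1))  ↔  xs has exactly n distinct values and contains 1..n
theorem pv_equal_char (n : Nat) (xs : List Int) :
    PySem.Set.equal (PySem.Set.ofList xs) (PySem.Set.ofList (PySem.List.pyRange 1 ((n : Int) + 1) 1)) = true
      ↔ ((PySem.Set.ofList xs).length = n ∧ ∀ x ∈ PySem.List.pyRange 1 ((n : Int) + 1) 1, x ∈ xs) := by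
  rw [PySem.Set.equal_iff, pv_ofList_range]
  constructor
  · intro he
    have hperm : (PySem.Set.ofList xs).Perm (PySem.List.pyRange 1 ((n : Int) + 1) 1) :=
      (List.perm_ext_iff_of_nodup (PySem.Set.nodup_ofList xs) (pv_nodup_range n)).mpr he
    refine ⟨by rw [hperm.length_eq, pv_len_range], ?_⟩
    intro x hx
    exact (PySem.Set.mem_ofList _ _).mp ((he x).mpr hx)
  · rintro ⟨hl, hmem⟩
    have hsub : PySem.List.pyRange 1 ((n : Int) + 1) 1 ⊆ PySem.Set.ofList xs :=
      fun x hx => (PySem.Set.mem_ofList _ _).mpr (hmem x hx)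
    have hperm := ((pv_nodup_range n).subperm hsub).perm_of_length_le
      (by rw [hl, pv_len_range])
    exact fun x => hperm.symm.mem_iff

-- A's per-list "bad" test is exactly the negation of B's set-equality test
theorem pv_badtest (n : Nat) (xs : List Int) :
    (decide (((PySem.Set.ofList xs).length : Int) ≠ (n : Int)) ||
      (PySem.List.pyRange 1 ((n : Int) + 1) 1).any (fun x => !(xs.contains x)))
    = !(PySem.Set.equal (PySem.Set.ofList xs) (PySem.Set.ofList (PySem.List.pyRange 1 ((n : Int) + 1) 1))) := by
  by_cases he : PySem.Set.equal (PySem.Set.ofList xs) (PySem.Set.ofList (PySem.List.pyRange 1 ((n : Int) + 1) 1)) = true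
  · obtain ⟨hl, hmem⟩ := (pv_equal_char n xs).mp he
    simp only [he, Bool.not_true, Bool.or_eq_false_iff, decide_eq_false_iff_not, List.any_eq_false]
    constructor
    · simp [hl]
    · intro x hx
      simp [hmem x hx]
  · have := (not_iff_not.mpr (pv_equal_char n xs)).mp he
    rw [Bool.not_eq_true] at he
    simp [he]
    rcases not_and_or.mp this with h | h
    · left; exact_mod_cast h
    · right
      push Not at h
      obtain ⟨x, hx, hnx⟩ := h
      have hx' := PySem.List.mem_pyRange_one.mp hx
      exact ⟨x, ⟨hx'.1, by omega⟩, by simpa using hnx⟩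

-- a Bool-and foldl is 'all'
theorem pv_foldl_band {α : Type} (p : α → Bool) (l : List α) (b : Bool) :
    l.foldl (fun acc x => acc && p x) b = (b && l.all p) := by
  induction l generalizing b with
  | nil => simp
  | cons x xs ih => simp [ih, Bool.and_assoc]

-- the cols component of B's fold, elementwise
theorem pv_cols_fold (m : List (List Int)) :
    ∀ (cs : List (PySem.Set Int)), (∀ row ∈ m, cs.length ≤ row.length) →
      (m.foldl (fun cs row => List.zipWith PySem.Set.add cs row ++ cs.drop row.length) cs).length = cs.length ∧
      ∀ j, j < cs.length →
        (m.foldl (fun cs row => List.zipWith PySem.Set.add cs row ++ cs.drop row.length) cs).getD j [] =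
          m.foldl (fun s row => PySem.Set.add s (row.getD j 0)) (cs.getD j []) := by
  induction m with
  | nil => intro cs _; exact ⟨rfl, fun j _ => rfl⟩
  | cons row rows ih =>
    intro cs hlen
    have hrow : cs.length ≤ row.length := hlen row (by simp)
    have hdrop : cs.drop row.length = [] := List.drop_eq_nil_of_le hrow
    have hzlen : (List.zipWith PySem.Set.add cs row).length = cs.length := by
      simp [List.length_zipWith, Nat.min_eq_left hrow]
    have hstep : List.zipWith PySem.Set.add cs row ++ cs.drop row.length = List.zipWith PySem.Set.add cs row := by
      rw [hdrop, List.append_nil]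
    have hlen' : ∀ r ∈ rows, (List.zipWith PySem.Set.add cs row).length ≤ r.length := by
      intro r hr; rw [hzlen]; exact hlen r (by simp [hr])
    obtain ⟨ihl, ihg⟩ := ih (List.zipWith PySem.Set.add cs row) hlen'
    constructor
    · simp only [List.foldl_cons, hstep, ihl, hzlen]
    · intro j hj
      have hj' : j < (List.zipWith PySem.Set.add cs row).length := by rwa [hzlen]
      have hjr : j < row.length := lt_of_lt_of_le hj hrow
      simp only [List.foldl_cons, hstep]
      rw [ihg j hj']
      congr 1
      rw [List.getD_eq_getElem _ _ hj', List.getD_eq_getElem _ _ hj,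
          List.getD_eq_getElem _ _ hjr, List.getElem_zipWith]

-- A's column-j list (indices over range with pyGetD) is just mapping getD j over the rows
theorem pv_column_eq (matrix : List (List Int)) (j : Nat) :
    (List.map (fun (k : Nat) => (k : Int)) (List.range matrix.length)).map
      (fun i => PySem.List.pyGetD (PySem.List.pyGetD matrix i []) ((j : Int)) 0) =
    matrix.map (fun row => row.getD j 0) := by
  rw [List.map_map]
  apply List.ext_getElem
  · simp
  · intro i h1 h2
    have hi : i < matrix.length := by simpa using h2
    simp only [List.getElem_map, List.getElem_range, Function.comp_apply, PySem.List.pyGetD_natCast]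
    rw [List.getD_eq_getElem _ _ hi]

-- ===== VERDICT (by name: the statement is the Claim_ definition above) =====
theorem is_valid_matrix_spec : Claim_equal_is_valid_matrix := by
  intro matrix _
  unfold Spec_is_valid_matrix is_valid_matrix is_valid_matrix_alt
  simp only []
  rw [PySem.List.foldl_prod_mk
      (f := fun b (row : List Int) => b && PySem.Set.equal (PySem.Set.ofList row)
        (PySem.Set.ofList (PySem.List.pyRange 1 ((matrix.length : Int) + 1) 1)))
      (g := fun cs (row : List Int) => List.zipWith PySem.Set.add cs row ++ cs.drop row.length),
      pv_foldl_band, Bool.true_and]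
  by_cases hall : ∀ row ∈ matrix, PySem.Set.equal (PySem.Set.ofList row)
      (PySem.Set.ofList (PySem.List.pyRange 1 ((matrix.length : Int) + 1) 1)) = true
  · -- every row set equals the target
    have hA1 : (matrix.any fun row =>
        decide (((PySem.Set.ofList row).length : Int) ≠ (matrix.length : Int)) ||
          (PySem.List.pyRange 1 ((matrix.length : Int) + 1) 1).any fun x => !row.contains x) = false := by
      rw [List.any_eq_false]
      intro row hr
      rw [pv_badtest matrix.length row, hall row hr]
      simp
    have hBall : (matrix.all fun row => PySem.Set.equal (PySem.Set.ofList row)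
        (PySem.Set.ofList (PySem.List.pyRange 1 ((matrix.length : Int) + 1) 1))) = true :=
      List.all_eq_true.mpr hall
    rw [hA1, hBall, Bool.true_and]
    simp only [Bool.false_eq_true, if_false]
    -- every row has length ≥ n
    have hrowlen : ∀ row ∈ matrix,
        (List.replicate matrix.length (PySem.Set.empty : PySem.Set Int)).length ≤ row.length := by
      intro row hr
      have h1 := ((pv_equal_char matrix.length row).mp (hall row hr)).1
      have h2 := PySem.Set.length_ofList_le row
      simp only [List.length_replicate]
      omega
    obtain ⟨hclen, hcget⟩ := pv_cols_fold matrix _ hrowlen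
    have hcol : ∀ j, j < matrix.length →
        (matrix.foldl (fun cs row => List.zipWith PySem.Set.add cs row ++ cs.drop row.length)
          (List.replicate matrix.length PySem.Set.empty)).getD j [] =
        PySem.Set.ofList (matrix.map fun row => row.getD j 0) := by
      intro j hj
      rw [hcget j (by simpa using hj), List.getD_replicate _ hj,
          PySem.Set.ofList_eq_foldl, List.foldl_map]
      rfl
    -- A's column test, reindexed over Nat and with the column list identified
    have hA2 : ((PySem.List.pyRange 0 (matrix.length : Int) 1).any fun j =>
        decide (((PySem.Set.ofList ((PySem.List.pyRange 0 (matrix.length : Int) 1).map fun i =>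
            PySem.List.pyGetD (PySem.List.pyGetD matrix i []) j 0)).length : Int) ≠ (matrix.length : Int)) ||
          (PySem.List.pyRange 1 ((matrix.length : Int) + 1) 1).any fun x =>
            !((PySem.List.pyRange 0 (matrix.length : Int) 1).map fun i =>
              PySem.List.pyGetD (PySem.List.pyGetD matrix i []) j 0).contains x)
        = (List.range matrix.length).any fun j =>
            !(PySem.Set.equal (PySem.Set.ofList (matrix.map fun row => row.getD j 0))
              (PySem.Set.ofList (PySem.List.pyRange 1 ((matrix.length : Int) + 1) 1))) := by
      rw [PySem.List.pyRange_zero_natCast, List.any_map]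
      apply PySem.List.any_congr_mem
      intro j hj
      have hj' : j < matrix.length := List.mem_range.mp hj
      have hcolumn := pv_column_eq matrix j
      simp only [Function.comp, hcolumn]
      exact pv_badtest matrix.length _
    rw [hA2]
    by_cases hcols : ∀ j < matrix.length,
        PySem.Set.equal (PySem.Set.ofList (matrix.map fun row => row.getD j 0))
          (PySem.Set.ofList (PySem.List.pyRange 1 ((matrix.length : Int) + 1) 1)) = true
    · have h1 : ((List.range matrix.length).any fun j =>
          !(PySem.Set.equal (PySem.Set.ofList (matrix.map fun row => row.getD j 0))
            (PySem.Set.ofList (PySem.List.pyRange 1 ((matrix.length : Int) + 1) 1)))) = false := by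
        rw [List.any_eq_false]
        intro j hj
        rw [hcols j (List.mem_range.mp hj)]
        simp
      have h2 : ((matrix.foldl (fun cs row => List.zipWith PySem.Set.add cs row ++ cs.drop row.length)
          (List.replicate matrix.length PySem.Set.empty)).all fun c =>
            PySem.Set.equal c (PySem.Set.ofList (PySem.List.pyRange 1 ((matrix.length : Int) + 1) 1))) = true := by
        rw [List.all_eq_true]
        intro c hc
        obtain ⟨j, hj, rfl⟩ := List.mem_iff_getElem.mp hc
        have hj' : j < matrix.length := by
          rw [hclen, List.length_replicate] at hj
          exact hj
        rw [← List.getD_eq_getElem _ [] hj, hcol j hj']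
        exact hcols j hj'
      rw [h1, h2]
      simp
    · push Not at hcols
      obtain ⟨j, hj, hbad⟩ := hcols
      rw [ne_eq, Bool.not_eq_true] at hbad
      have h1 : ((List.range matrix.length).any fun j =>
          !(PySem.Set.equal (PySem.Set.ofList (matrix.map fun row => row.getD j 0))
            (PySem.Set.ofList (PySem.List.pyRange 1 ((matrix.length : Int) + 1) 1)))) = true :=
        List.any_eq_true.mpr ⟨j, List.mem_range.mpr hj, by rw [hbad]; rfl⟩
      have h2 : ((matrix.foldl (fun cs row => List.zipWith PySem.Set.add cs row ++ cs.drop row.length)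
          (List.replicate matrix.length PySem.Set.empty)).all fun c =>
            PySem.Set.equal c (PySem.Set.ofList (PySem.List.pyRange 1 ((matrix.length : Int) + 1) 1))) = false := by
        rw [List.all_eq_false]
        refine ⟨(matrix.foldl (fun cs row => List.zipWith PySem.Set.add cs row ++ cs.drop row.length)
          (List.replicate matrix.length PySem.Set.empty)).getD j [], ?_, ?_⟩
        · have hj2 : j < (matrix.foldl (fun cs row => List.zipWith PySem.Set.add cs row ++ cs.drop row.length)
              (List.replicate matrix.length PySem.Set.empty)).length := by
            rw [hclen, List.length_replicate]; exact hj
          rw [List.getD_eq_getElem _ [] hj2]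
          exact List.getElem_mem hj2
        · rw [hcol j hj, hbad]
          exact Bool.false_ne_true
      rw [h1, h2]
      simp
  · -- some row fails: both sides are false
    push Not at hall
    obtain ⟨row, hrmem, hrbad⟩ := hall
    have hA1 : (matrix.any fun row =>
        decide (((PySem.Set.ofList row).length : Int) ≠ (matrix.length : Int)) ||
          (PySem.List.pyRange 1 ((matrix.length : Int) + 1) 1).any fun x => !row.contains x) = true := by
      refine List.any_eq_true.mpr ⟨row, hrmem, ?_⟩
      rw [pv_badtest matrix.length row]
      simp [hrbad]
    have hB : (matrix.all fun row => PySem.Set.equal (PySem.Set.ofList row)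
        (PySem.Set.ofList (PySem.List.pyRange 1 ((matrix.length : Int) + 1) 1))) = false := by
      rw [List.all_eq_false]
      exact ⟨row, hrmem, hrbad⟩
    rw [hA1, hB]
    simp
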